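-- pv_equiv track=rewrite | github.com/reader-zyz/self-grounding | utils/annotate.py | get_spatial_relation
-- ===== SOURCE A (Python) =====
-- def get_spatial_relation(pos1, pos2):
--     '''
--     根据两个物体的三维坐标，得到两者信息量最大的方向描述
--     '''
--     # 计算相对向量
--     relative_vector = [pos2[i] - pos1[i] for i in range(3)]
--
--     # 计算每个方向的绝对值（权重）
--     direction_weights = {
--         'on the right of': abs(relative_vector[0]) if relative_vector[0] > 0 else 0, #
--         'on the left of': abs(relative_vector[0]) if relative_vector[0] < 0 else 0, #
--         'behind': abs(relative_vector[1]) if relative_vector[1] < 0 else 0, #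
--         'in front of': abs(relative_vector[1]) if relative_vector[1] > 0 else 0, #
--         'under': abs(relative_vector[2]) if relative_vector[2] > 0 else 0, # 上
--         'above': abs(relative_vector[2]) if relative_vector[2] < 0 else 0, # 下
--     }
--
--     # 过滤掉权重为0的方向
--     direction_weights = {k: v for k, v in direction_weights.items() if v > 0}
--
--     # 如果没有显著方向，则认为是同一位置
--     if not direction_weights:
--         return 'at the same position with'
--
--     # 按权重从大到小排序
--     sorted_directions = sorted(direction_weights.keys(), key=lambda x: direction_weights[x], reverse=True)
--
--     # 选择至多两个最显著的方向
--     selected_directions = sorted_directions[0]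
--
--     # 组合方向
--     return ''.join(selected_directions)
-- ===== SOURCE B (Python) =====
-- def get_spatial_relation(pos1, pos2):
--     '''
--     根据两个物体的三维坐标，得到两者信息量最大的方向描述
--     '''
--     dx = pos2[0] - pos1[0]
--     dy = pos2[1] - pos1[1]
--     dz = pos2[2] - pos1[2]
--     ax, ay, az = abs(dx), abs(dy), abs(dz)
--     if ax == 0 and ay == 0 and az == 0:
--         return 'at the same position with'
--     if ax >= ay and ax >= az:
--         return 'on the right of' if dx > 0 else 'on the left of'
--     if ay >= az:
--         return 'in front of' if dy > 0 else 'behind'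
--     return 'under' if dz > 0 else 'above'
-- ===== Notes on version B (the rewrite author's own statement) =====
-- stated objective: simpler
-- what changed: Replaces the dict of weighted direction labels, the filter pass and the stable descending sort with direct comparisons of the three absolute components (priority X>Y>Z matching the stable sort's tie-break), returning the label immediately.
import Mathlib
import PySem

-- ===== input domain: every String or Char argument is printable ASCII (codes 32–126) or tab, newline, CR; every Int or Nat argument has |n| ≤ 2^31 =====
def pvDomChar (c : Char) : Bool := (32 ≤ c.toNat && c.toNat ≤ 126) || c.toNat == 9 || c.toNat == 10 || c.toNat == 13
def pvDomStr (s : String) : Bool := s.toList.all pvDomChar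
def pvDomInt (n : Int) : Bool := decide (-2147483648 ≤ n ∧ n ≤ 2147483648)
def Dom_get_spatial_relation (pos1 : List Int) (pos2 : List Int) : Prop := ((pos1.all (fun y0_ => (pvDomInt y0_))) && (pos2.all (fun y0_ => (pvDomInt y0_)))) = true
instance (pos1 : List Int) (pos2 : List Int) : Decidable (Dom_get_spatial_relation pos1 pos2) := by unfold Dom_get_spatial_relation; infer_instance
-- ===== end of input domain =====

-- B replaces A's dict-build / filter / stable descending sort by direct comparisons of the
-- three absolute components with the same X>Y>Z tie-break (objective: simpler).

-- ===== PORT A =====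
def get_spatial_relation (pos1 : List Int) (pos2 : List Int) : String :=
  -- relative_vector = [pos2[i] - pos1[i] for i in range(3)]  (indexing safe under Pre_)
  let rv := (PySem.List.pyRange 0 3 1).map
    (fun i => PySem.List.pyGetD pos2 i 0 - PySem.List.pyGetD pos1 i 0)
  let r0 := PySem.List.pyGetD rv 0 0
  let r1 := PySem.List.pyGetD rv 1 0
  let r2 := PySem.List.pyGetD rv 2 0
  let dw : PySem.Dict String Int := PySem.Dict.ofList
    [("on the right of", if r0 > 0 then |r0| else 0),
     ("on the left of",  if r0 < 0 then |r0| else 0),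
     ("behind",          if r1 < 0 then |r1| else 0),
     ("in front of",     if r1 > 0 then |r1| else 0),
     ("under",           if r2 > 0 then |r2| else 0),
     ("above",           if r2 < 0 then |r2| else 0)]
  -- {k: v for k, v in direction_weights.items() if v > 0}
  let dw2 : PySem.Dict String Int := PySem.Dict.ofList (dw.items.filter (fun kv => kv.2 > 0))
  if dw2.items.isEmpty then "at the same position with"
  else
    -- sorted(keys, key=weights[k], reverse=True); [0] is safe: the dict is nonempty here
    let sortedDirs := PySem.List.sorted dw2.keys (fun k => dw2.getD k 0) true
    let selected := PySem.List.pyGetD sortedDirs 0 ""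
    selected  -- ''.join of a str is the str itself

-- ===== PORT B =====
def get_spatial_relation_alt (pos1 : List Int) (pos2 : List Int) : String :=
  let dx := PySem.List.pyGetD pos2 0 0 - PySem.List.pyGetD pos1 0 0
  let dy := PySem.List.pyGetD pos2 1 0 - PySem.List.pyGetD pos1 1 0
  let dz := PySem.List.pyGetD pos2 2 0 - PySem.List.pyGetD pos1 2 0
  let ax := |dx|; let ay := |dy|; let az := |dz|
  if ax = 0 ∧ ay = 0 ∧ az = 0 then "at the same position with"
  else if ax ≥ ay ∧ ax ≥ az then (if dx > 0 then "on the right of" else "on the left of")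
  else if ay ≥ az then (if dy > 0 then "in front of" else "behind")
  else if dz > 0 then "under" else "above"

-- ===== PRECONDITION & SPEC =====
-- Pre_ excludes exactly the inputs where Python A raises IndexError: a list shorter than 3.
def Pre_get_spatial_relation (pos1 : List Int) (pos2 : List Int) : Prop :=
  3 ≤ pos1.length ∧ 3 ≤ pos2.length
instance (pos1 : List Int) (pos2 : List Int) : Decidable (Pre_get_spatial_relation pos1 pos2) := by unfold Pre_get_spatial_relation; infer_instance
def pvWitness_get_spatial_relation : List Int × List Int := ([0, 1, 2], [3, 1, 0])

def Spec_get_spatial_relation (pos1 : List Int) (pos2 : List Int) (out : String) : Prop := out = get_spatial_relation_alt pos1 pos2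
instance (pos1 : List Int) (pos2 : List Int) (out : String) : Decidable (Spec_get_spatial_relation pos1 pos2 out) := by unfold Spec_get_spatial_relation; infer_instance

-- ===== CLAIM (what is proved, stated in full; the proofs are below) =====
def Claim_equal_get_spatial_relation : Prop := ∀ (pos1 : List Int) (pos2 : List Int), Dom_get_spatial_relation pos1 pos2 → Pre_get_spatial_relation pos1 pos2 → Spec_get_spatial_relation pos1 pos2 (get_spatial_relation pos1 pos2)

-- ===== LEMMAS AND PROOFS =====


-- Proof-side helper: A's computation as a function of the three differences.
def pvCoreA (dx dy dz : Int) : String :=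
  let dw : PySem.Dict String Int := PySem.Dict.ofList
    [("on the right of", if dx > 0 then |dx| else 0),
     ("on the left of",  if dx < 0 then |dx| else 0),
     ("behind",          if dy < 0 then |dy| else 0),
     ("in front of",     if dy > 0 then |dy| else 0),
     ("under",           if dz > 0 then |dz| else 0),
     ("above",           if dz < 0 then |dz| else 0)]
  let dw2 : PySem.Dict String Int := PySem.Dict.ofList (dw.items.filter (fun kv => kv.2 > 0))
  if dw2.items.isEmpty then "at the same position with"
  else
    let sortedDirs := PySem.List.sorted dw2.keys (fun k => dw2.getD k 0) true
    PySem.List.pyGetD sortedDirs 0 ""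

def pvCoreB (dx dy dz : Int) : String :=
  if |dx| = 0 ∧ |dy| = 0 ∧ |dz| = 0 then "at the same position with"
  else if |dx| ≥ |dy| ∧ |dx| ≥ |dz| then (if dx > 0 then "on the right of" else "on the left of")
  else if |dy| ≥ |dz| then (if dy > 0 then "in front of" else "behind")
  else if dz > 0 then "under" else "above"

theorem pvA_cons (x1 y1 z1 x2 y2 z2 : Int) (t1 t2 : List Int) :
    get_spatial_relation (x1 :: y1 :: z1 :: t1) (x2 :: y2 :: z2 :: t2)
      = pvCoreA (x2 - x1) (y2 - y1) (z2 - z1) := by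
  have hr : PySem.List.pyRange 0 3 1 = [0, 1, 2] := by decide
  unfold get_spatial_relation pvCoreA
  simp only [hr, List.map_cons, List.map_nil, pysem, List.getD_cons_zero, List.getD_cons_succ]

theorem pvB_cons (x1 y1 z1 x2 y2 z2 : Int) (t1 t2 : List Int) :
    get_spatial_relation_alt (x1 :: y1 :: z1 :: t1) (x2 :: y2 :: z2 :: t2)
      = pvCoreB (x2 - x1) (y2 - y1) (z2 - z1) := by
  unfold get_spatial_relation_alt pvCoreB
  simp only [pysem, List.getD_cons_zero, List.getD_cons_succ]

set_option maxHeartbeats 2000000 in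
theorem pvCore_eq (dx dy dz : Int) : pvCoreA dx dy dz = pvCoreB dx dy dz := by
  unfold pvCoreA pvCoreB
  rcases lt_trichotomy dx 0 with hx | hx | hx <;>
  rcases lt_trichotomy dy 0 with hy | hy | hy <;>
  rcases lt_trichotomy dz 0 with hz | hz | hz
  · simp only [abs_of_neg hx, if_pos hx, if_neg (by omega : ¬ dx > 0), abs_of_neg hy, if_pos hy, if_neg (by omega : ¬ dy > 0), abs_of_neg hz, if_pos hz, if_neg (by omega : ¬ dz > 0)]
    simp [hx, hy, hz, PySem.Dict.ofList, PySem.Dict.insert, PySem.Dict.update, PySem.Dict.empty, PySem.Dict.keys, PySem.Dict.getD, PySem.Dict.get?, PySem.Dict.contains, PySem.List.sorted, PySem.List.insertBy]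
    try omega
    try (split_ifs <;> simp_all [PySem.List.insertBy] <;> (try omega) <;> split_ifs <;> simp_all [PySem.List.pyGetD_zero_cons] <;> omega)
  · subst hz; simp only [abs_of_neg hx, if_pos hx, if_neg (by omega : ¬ dx > 0), abs_of_neg hy, if_pos hy, if_neg (by omega : ¬ dy > 0)]
    simp [hx, hy, PySem.Dict.ofList, PySem.Dict.insert, PySem.Dict.update, PySem.Dict.empty, PySem.Dict.keys, PySem.Dict.getD, PySem.Dict.get?, PySem.Dict.contains, PySem.List.sorted, PySem.List.insertBy]
    try omega
    try (split_ifs <;> simp_all [PySem.List.insertBy] <;> (try omega) <;> split_ifs <;> simp_all [PySem.List.pyGetD_zero_cons] <;> omega)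
  · simp only [abs_of_neg hx, if_pos hx, if_neg (by omega : ¬ dx > 0), abs_of_neg hy, if_pos hy, if_neg (by omega : ¬ dy > 0), abs_of_pos hz, if_pos hz, if_neg (by omega : ¬ dz < 0)]
    simp [hx, hy, hz, PySem.Dict.ofList, PySem.Dict.insert, PySem.Dict.update, PySem.Dict.empty, PySem.Dict.keys, PySem.Dict.getD, PySem.Dict.get?, PySem.Dict.contains, PySem.List.sorted, PySem.List.insertBy]
    try omega
    try (split_ifs <;> simp_all [PySem.List.insertBy] <;> (try omega) <;> split_ifs <;> simp_all [PySem.List.pyGetD_zero_cons] <;> omega)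
  · subst hy; simp only [abs_of_neg hx, if_pos hx, if_neg (by omega : ¬ dx > 0), abs_of_neg hz, if_pos hz, if_neg (by omega : ¬ dz > 0)]
    simp [hx, hz, PySem.Dict.ofList, PySem.Dict.insert, PySem.Dict.update, PySem.Dict.empty, PySem.Dict.keys, PySem.Dict.getD, PySem.Dict.get?, PySem.Dict.contains, PySem.List.sorted, PySem.List.insertBy]
    try omega
    try (split_ifs <;> simp_all [PySem.List.insertBy] <;> (try omega) <;> split_ifs <;> simp_all [PySem.List.pyGetD_zero_cons] <;> omega)
  · subst hy; subst hz; simp only [abs_of_neg hx, if_pos hx, if_neg (by omega : ¬ dx > 0)]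
    simp [hx, PySem.Dict.ofList, PySem.Dict.insert, PySem.Dict.update, PySem.Dict.empty, PySem.Dict.keys, PySem.Dict.getD, PySem.Dict.get?, PySem.Dict.contains, PySem.List.sorted, PySem.List.insertBy]
    try omega
    try (split_ifs <;> simp_all [PySem.List.insertBy] <;> (try omega) <;> split_ifs <;> simp_all [PySem.List.pyGetD_zero_cons] <;> omega)
  · subst hy; simp only [abs_of_neg hx, if_pos hx, if_neg (by omega : ¬ dx > 0), abs_of_pos hz, if_pos hz, if_neg (by omega : ¬ dz < 0)]
    simp [hx, hz, PySem.Dict.ofList, PySem.Dict.insert, PySem.Dict.update, PySem.Dict.empty, PySem.Dict.keys, PySem.Dict.getD, PySem.Dict.get?, PySem.Dict.contains, PySem.List.sorted, PySem.List.insertBy]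
    try omega
    try (split_ifs <;> simp_all [PySem.List.insertBy] <;> (try omega) <;> split_ifs <;> simp_all [PySem.List.pyGetD_zero_cons] <;> omega)
  · simp only [abs_of_neg hx, if_pos hx, if_neg (by omega : ¬ dx > 0), abs_of_pos hy, if_pos hy, if_neg (by omega : ¬ dy < 0), abs_of_neg hz, if_pos hz, if_neg (by omega : ¬ dz > 0)]
    simp [hx, hy, hz, PySem.Dict.ofList, PySem.Dict.insert, PySem.Dict.update, PySem.Dict.empty, PySem.Dict.keys, PySem.Dict.getD, PySem.Dict.get?, PySem.Dict.contains, PySem.List.sorted, PySem.List.insertBy]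
    try omega
    try (split_ifs <;> simp_all [PySem.List.insertBy] <;> (try omega) <;> split_ifs <;> simp_all [PySem.List.pyGetD_zero_cons] <;> omega)
  · subst hz; simp only [abs_of_neg hx, if_pos hx, if_neg (by omega : ¬ dx > 0), abs_of_pos hy, if_pos hy, if_neg (by omega : ¬ dy < 0)]
    simp [hx, hy, PySem.Dict.ofList, PySem.Dict.insert, PySem.Dict.update, PySem.Dict.empty, PySem.Dict.keys, PySem.Dict.getD, PySem.Dict.get?, PySem.Dict.contains, PySem.List.sorted, PySem.List.insertBy]
    try omega
    try (split_ifs <;> simp_all [PySem.List.insertBy] <;> (try omega) <;> split_ifs <;> simp_all [PySem.List.pyGetD_zero_cons] <;> omega)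
  · simp only [abs_of_neg hx, if_pos hx, if_neg (by omega : ¬ dx > 0), abs_of_pos hy, if_pos hy, if_neg (by omega : ¬ dy < 0), abs_of_pos hz, if_pos hz, if_neg (by omega : ¬ dz < 0)]
    simp [hx, hy, hz, PySem.Dict.ofList, PySem.Dict.insert, PySem.Dict.update, PySem.Dict.empty, PySem.Dict.keys, PySem.Dict.getD, PySem.Dict.get?, PySem.Dict.contains, PySem.List.sorted, PySem.List.insertBy]
    try omega
    try (split_ifs <;> simp_all [PySem.List.insertBy] <;> (try omega) <;> split_ifs <;> simp_all [PySem.List.pyGetD_zero_cons] <;> omega)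
  · subst hx; simp only [abs_of_neg hy, if_pos hy, if_neg (by omega : ¬ dy > 0), abs_of_neg hz, if_pos hz, if_neg (by omega : ¬ dz > 0)]
    simp [hy, hz, PySem.Dict.ofList, PySem.Dict.insert, PySem.Dict.update, PySem.Dict.empty, PySem.Dict.keys, PySem.Dict.getD, PySem.Dict.get?, PySem.Dict.contains, PySem.List.sorted, PySem.List.insertBy]
    try omega
    try (split_ifs <;> simp_all [PySem.List.insertBy] <;> (try omega) <;> split_ifs <;> simp_all [PySem.List.pyGetD_zero_cons] <;> omega)
  · subst hx; subst hz; simp only [abs_of_neg hy, if_pos hy, if_neg (by omega : ¬ dy > 0)]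
    simp [hy, PySem.Dict.ofList, PySem.Dict.insert, PySem.Dict.update, PySem.Dict.empty, PySem.Dict.keys, PySem.Dict.getD, PySem.Dict.get?, PySem.Dict.contains, PySem.List.sorted, PySem.List.insertBy]
    try omega
    try (split_ifs <;> simp_all [PySem.List.insertBy] <;> (try omega) <;> split_ifs <;> simp_all [PySem.List.pyGetD_zero_cons] <;> omega)
  · subst hx; simp only [abs_of_neg hy, if_pos hy, if_neg (by omega : ¬ dy > 0), abs_of_pos hz, if_pos hz, if_neg (by omega : ¬ dz < 0)]
    simp [hy, hz, PySem.Dict.ofList, PySem.Dict.insert, PySem.Dict.update, PySem.Dict.empty, PySem.Dict.keys, PySem.Dict.getD, PySem.Dict.get?, PySem.Dict.contains, PySem.List.sorted, PySem.List.insertBy]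
    try omega
    try (split_ifs <;> simp_all [PySem.List.insertBy] <;> (try omega) <;> split_ifs <;> simp_all [PySem.List.pyGetD_zero_cons] <;> omega)
  · subst hx; subst hy; simp only [abs_of_neg hz, if_pos hz, if_neg (by omega : ¬ dz > 0)]
    simp [hz, PySem.Dict.ofList, PySem.Dict.insert, PySem.Dict.update, PySem.Dict.empty, PySem.Dict.keys, PySem.Dict.getD, PySem.Dict.get?, PySem.Dict.contains, PySem.List.sorted, PySem.List.insertBy]
    try omega
    try (split_ifs <;> simp_all [PySem.List.insertBy] <;> (try omega) <;> split_ifs <;> simp_all [PySem.List.pyGetD_zero_cons] <;> omega)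
  · subst hx; subst hy; subst hz; simp [PySem.Dict.ofList, PySem.Dict.insert, PySem.Dict.update, PySem.Dict.empty, PySem.Dict.keys, PySem.Dict.getD, PySem.Dict.get?, PySem.Dict.contains, PySem.List.sorted, PySem.List.insertBy]
    try omega
    try (split_ifs <;> simp_all [PySem.List.insertBy] <;> (try omega) <;> split_ifs <;> simp_all [PySem.List.pyGetD_zero_cons] <;> omega)
  · subst hx; subst hy; simp only [abs_of_pos hz, if_pos hz, if_neg (by omega : ¬ dz < 0)]
    simp [hz, PySem.Dict.ofList, PySem.Dict.insert, PySem.Dict.update, PySem.Dict.empty, PySem.Dict.keys, PySem.Dict.getD, PySem.Dict.get?, PySem.Dict.contains, PySem.List.sorted, PySem.List.insertBy]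
    try omega
    try (split_ifs <;> simp_all [PySem.List.insertBy] <;> (try omega) <;> split_ifs <;> simp_all [PySem.List.pyGetD_zero_cons] <;> omega)
  · subst hx; simp only [abs_of_pos hy, if_pos hy, if_neg (by omega : ¬ dy < 0), abs_of_neg hz, if_pos hz, if_neg (by omega : ¬ dz > 0)]
    simp [hy, hz, PySem.Dict.ofList, PySem.Dict.insert, PySem.Dict.update, PySem.Dict.empty, PySem.Dict.keys, PySem.Dict.getD, PySem.Dict.get?, PySem.Dict.contains, PySem.List.sorted, PySem.List.insertBy]
    try omega
    try (split_ifs <;> simp_all [PySem.List.insertBy] <;> (try omega) <;> split_ifs <;> simp_all [PySem.List.pyGetD_zero_cons] <;> omega)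
  · subst hx; subst hz; simp only [abs_of_pos hy, if_pos hy, if_neg (by omega : ¬ dy < 0)]
    simp [hy, PySem.Dict.ofList, PySem.Dict.insert, PySem.Dict.update, PySem.Dict.empty, PySem.Dict.keys, PySem.Dict.getD, PySem.Dict.get?, PySem.Dict.contains, PySem.List.sorted, PySem.List.insertBy]
    try omega
    try (split_ifs <;> simp_all [PySem.List.insertBy] <;> (try omega) <;> split_ifs <;> simp_all [PySem.List.pyGetD_zero_cons] <;> omega)
  · subst hx; simp only [abs_of_pos hy, if_pos hy, if_neg (by omega : ¬ dy < 0), abs_of_pos hz, if_pos hz, if_neg (by omega : ¬ dz < 0)]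
    simp [hy, hz, PySem.Dict.ofList, PySem.Dict.insert, PySem.Dict.update, PySem.Dict.empty, PySem.Dict.keys, PySem.Dict.getD, PySem.Dict.get?, PySem.Dict.contains, PySem.List.sorted, PySem.List.insertBy]
    try omega
    try (split_ifs <;> simp_all [PySem.List.insertBy] <;> (try omega) <;> split_ifs <;> simp_all [PySem.List.pyGetD_zero_cons] <;> omega)
  · simp only [abs_of_pos hx, if_pos hx, if_neg (by omega : ¬ dx < 0), abs_of_neg hy, if_pos hy, if_neg (by omega : ¬ dy > 0), abs_of_neg hz, if_pos hz, if_neg (by omega : ¬ dz > 0)]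
    simp [hx, hy, hz, PySem.Dict.ofList, PySem.Dict.insert, PySem.Dict.update, PySem.Dict.empty, PySem.Dict.keys, PySem.Dict.getD, PySem.Dict.get?, PySem.Dict.contains, PySem.List.sorted, PySem.List.insertBy]
    try omega
    try (split_ifs <;> simp_all [PySem.List.insertBy] <;> (try omega) <;> split_ifs <;> simp_all [PySem.List.pyGetD_zero_cons] <;> omega)
  · subst hz; simp only [abs_of_pos hx, if_pos hx, if_neg (by omega : ¬ dx < 0), abs_of_neg hy, if_pos hy, if_neg (by omega : ¬ dy > 0)]
    simp [hx, hy, PySem.Dict.ofList, PySem.Dict.insert, PySem.Dict.update, PySem.Dict.empty, PySem.Dict.keys, PySem.Dict.getD, PySem.Dict.get?, PySem.Dict.contains, PySem.List.sorted, PySem.List.insertBy]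
    try omega
    try (split_ifs <;> simp_all [PySem.List.insertBy] <;> (try omega) <;> split_ifs <;> simp_all [PySem.List.pyGetD_zero_cons] <;> omega)
  · simp only [abs_of_pos hx, if_pos hx, if_neg (by omega : ¬ dx < 0), abs_of_neg hy, if_pos hy, if_neg (by omega : ¬ dy > 0), abs_of_pos hz, if_pos hz, if_neg (by omega : ¬ dz < 0)]
    simp [hx, hy, hz, PySem.Dict.ofList, PySem.Dict.insert, PySem.Dict.update, PySem.Dict.empty, PySem.Dict.keys, PySem.Dict.getD, PySem.Dict.get?, PySem.Dict.contains, PySem.List.sorted, PySem.List.insertBy]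
    try omega
    try (split_ifs <;> simp_all [PySem.List.insertBy] <;> (try omega) <;> split_ifs <;> simp_all [PySem.List.pyGetD_zero_cons] <;> omega)
  · subst hy; simp only [abs_of_pos hx, if_pos hx, if_neg (by omega : ¬ dx < 0), abs_of_neg hz, if_pos hz, if_neg (by omega : ¬ dz > 0)]
    simp [hx, hz, PySem.Dict.ofList, PySem.Dict.insert, PySem.Dict.update, PySem.Dict.empty, PySem.Dict.keys, PySem.Dict.getD, PySem.Dict.get?, PySem.Dict.contains, PySem.List.sorted, PySem.List.insertBy]
    try omega
    try (split_ifs <;> simp_all [PySem.List.insertBy] <;> (try omega) <;> split_ifs <;> simp_all [PySem.List.pyGetD_zero_cons] <;> omega)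
  · subst hy; subst hz; simp only [abs_of_pos hx, if_pos hx, if_neg (by omega : ¬ dx < 0)]
    simp [hx, PySem.Dict.ofList, PySem.Dict.insert, PySem.Dict.update, PySem.Dict.empty, PySem.Dict.keys, PySem.Dict.getD, PySem.Dict.get?, PySem.Dict.contains, PySem.List.sorted, PySem.List.insertBy]
    try omega
    try (split_ifs <;> simp_all [PySem.List.insertBy] <;> (try omega) <;> split_ifs <;> simp_all [PySem.List.pyGetD_zero_cons] <;> omega)
  · subst hy; simp only [abs_of_pos hx, if_pos hx, if_neg (by omega : ¬ dx < 0), abs_of_pos hz, if_pos hz, if_neg (by omega : ¬ dz < 0)]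
    simp [hx, hz, PySem.Dict.ofList, PySem.Dict.insert, PySem.Dict.update, PySem.Dict.empty, PySem.Dict.keys, PySem.Dict.getD, PySem.Dict.get?, PySem.Dict.contains, PySem.List.sorted, PySem.List.insertBy]
    try omega
    try (split_ifs <;> simp_all [PySem.List.insertBy] <;> (try omega) <;> split_ifs <;> simp_all [PySem.List.pyGetD_zero_cons] <;> omega)
  · simp only [abs_of_pos hx, if_pos hx, if_neg (by omega : ¬ dx < 0), abs_of_pos hy, if_pos hy, if_neg (by omega : ¬ dy < 0), abs_of_neg hz, if_pos hz, if_neg (by omega : ¬ dz > 0)]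
    simp [hx, hy, hz, PySem.Dict.ofList, PySem.Dict.insert, PySem.Dict.update, PySem.Dict.empty, PySem.Dict.keys, PySem.Dict.getD, PySem.Dict.get?, PySem.Dict.contains, PySem.List.sorted, PySem.List.insertBy]
    try omega
    try (split_ifs <;> simp_all [PySem.List.insertBy] <;> (try omega) <;> split_ifs <;> simp_all [PySem.List.pyGetD_zero_cons] <;> omega)
  · subst hz; simp only [abs_of_pos hx, if_pos hx, if_neg (by omega : ¬ dx < 0), abs_of_pos hy, if_pos hy, if_neg (by omega : ¬ dy < 0)]
    simp [hx, hy, PySem.Dict.ofList, PySem.Dict.insert, PySem.Dict.update, PySem.Dict.empty, PySem.Dict.keys, PySem.Dict.getD, PySem.Dict.get?, PySem.Dict.contains, PySem.List.sorted, PySem.List.insertBy]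
    try omega
    try (split_ifs <;> simp_all [PySem.List.insertBy] <;> (try omega) <;> split_ifs <;> simp_all [PySem.List.pyGetD_zero_cons] <;> omega)
  · simp only [abs_of_pos hx, if_pos hx, if_neg (by omega : ¬ dx < 0), abs_of_pos hy, if_pos hy, if_neg (by omega : ¬ dy < 0), abs_of_pos hz, if_pos hz, if_neg (by omega : ¬ dz < 0)]
    simp [hx, hy, hz, PySem.Dict.ofList, PySem.Dict.insert, PySem.Dict.update, PySem.Dict.empty, PySem.Dict.keys, PySem.Dict.getD, PySem.Dict.get?, PySem.Dict.contains, PySem.List.sorted, PySem.List.insertBy]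
    try omega
    try (split_ifs <;> simp_all [PySem.List.insertBy] <;> (try omega) <;> split_ifs <;> simp_all [PySem.List.pyGetD_zero_cons] <;> omega)

-- ===== VERDICT (by name: the statement is the Claim_ definition above) =====
theorem get_spatial_relation_spec : Claim_equal_get_spatial_relation := by
  intro pos1 pos2 _ hpre
  obtain ⟨h1, h2⟩ := hpre
  match pos1, pos2 with
  | x1 :: y1 :: z1 :: t1, x2 :: y2 :: z2 :: t2 =>
    unfold Spec_get_spatial_relation
    rw [pvA_cons, pvB_cons, pvCore_eq]
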